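-- pv_equiv track=rewrite | github.com/Praseetha-KR/lab | problems/0078-backspace-string-compare/approach2.py | rendered_string
-- ===== SOURCE A (Python) =====
-- def rendered_string(s: str) -> str:
--     res = []
--     for c in s:
--         if c != "#":
--             res.append(c)
--         elif res:
--             res.pop()
--     return "".join(res)
-- ===== SOURCE B (Python) =====
-- def rendered_string(s: str) -> str:
--     out = []
--     skip = 0
--     for c in reversed(s):
--         if c == "#":
--             skip += 1
--         elif skip:
--             skip -= 1
--         else:
--             out.append(c)
--     return "".join(reversed(out))
-- ===== Notes on version B (the rewrite author's own statement) =====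
-- stated objective: alternative
-- what changed: Replaces the left-to-right stack (append/pop per '#') with a single right-to-left scan keeping an integer skip counter, collecting surviving characters in reverse and reversing once at the end.
import Mathlib
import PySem

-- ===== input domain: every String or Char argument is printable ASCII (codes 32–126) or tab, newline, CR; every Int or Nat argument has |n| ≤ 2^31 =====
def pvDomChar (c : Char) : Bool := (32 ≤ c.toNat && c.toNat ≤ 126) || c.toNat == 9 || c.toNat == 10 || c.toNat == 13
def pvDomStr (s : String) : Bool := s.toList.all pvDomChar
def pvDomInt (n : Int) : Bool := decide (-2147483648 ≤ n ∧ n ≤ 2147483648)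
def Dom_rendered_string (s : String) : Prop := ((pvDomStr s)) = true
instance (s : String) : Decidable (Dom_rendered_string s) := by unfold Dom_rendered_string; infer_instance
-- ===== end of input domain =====

-- B replaces A's left-to-right stack (append/pop) with a right-to-left scan and a skip counter (objective: alternative decomposition; same cost).

-- ===== PORT A =====
-- one iteration of A's loop: append c, or pop if res is nonempty
def pvStepA (res : List Char) (c : Char) : List Char :=
  if c ≠ '#' then res ++ [c] else if res ≠ [] then res.dropLast else res

def rendered_string (s : String) : String :=
  String.mk (s.toList.foldl pvStepA [])

-- ===== PORT B =====
-- B's loop over reversed(s): '#' increments skip, a kept char is appended to out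
def pvGoB : List Char → Nat → List Char
  | [], _ => []
  | c :: rest, skip =>
    if c = '#' then pvGoB rest (skip + 1)
    else if skip > 0 then pvGoB rest (skip - 1)
    else c :: pvGoB rest skip

def rendered_string_alt (s : String) : String :=
  String.mk ((pvGoB s.toList.reverse 0).reverse)

-- ===== PRECONDITION & SPEC =====
def Spec_rendered_string (s : String) (out : String) : Prop := out = rendered_string_alt s
instance (s : String) (out : String) : Decidable (Spec_rendered_string s out) := by unfold Spec_rendered_string; infer_instance

-- ===== CLAIM (what is proved, stated in full; the proofs are below) =====
def Claim_equal_rendered_string : Prop := ∀ (s : String), Dom_rendered_string s → Spec_rendered_string s (rendered_string s)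

-- ===== LEMMAS AND PROOFS =====

-- k backspaces applied to the end of a list
def pvDropN : Nat → List Char → List Char
  | 0, x => x
  | k + 1, x => pvDropN k x.dropLast

theorem pvDropN_nil (k : Nat) : pvDropN k ([] : List Char) = [] := by
  induction k with
  | zero => rfl
  | succ k ih => simpa [pvDropN] using ih

theorem pvStepA_hash (res : List Char) : pvStepA res '#' = res.dropLast := by
  unfold pvStepA
  split_ifs with h1 h2 <;> simp_all

theorem pvGoB_eq (r : List Char) (k : Nat) :
    pvGoB r k = (pvDropN k (r.reverse.foldl pvStepA [])).reverse := by
  induction r generalizing k with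
  | nil => simp only [pvGoB, List.reverse_nil, List.foldl_nil, pvDropN_nil, List.reverse_nil]
  | cons c rest ih =>
    simp only [pvGoB, List.reverse_cons, List.foldl_append, List.foldl_cons, List.foldl_nil]
    by_cases hc : c = '#'
    · subst hc
      simp only [ih, pvStepA_hash]
      rfl
    · rw [if_neg hc]
      have hs : pvStepA (rest.reverse.foldl pvStepA []) c
          = rest.reverse.foldl pvStepA [] ++ [c] := by
        unfold pvStepA; rw [if_pos hc]
      cases k with
      | zero =>
        simp only [Nat.lt_irrefl, ih, hs, pvDropN]
        simp
      | succ k' =>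
        simp only [if_pos (Nat.succ_pos k'), Nat.succ_sub_one, ih, hs]
        have : pvDropN (k' + 1) (rest.reverse.foldl pvStepA [] ++ [c])
            = pvDropN k' (rest.reverse.foldl pvStepA []) := by
          simp [pvDropN]
        rw [this]

-- ===== VERDICT (by name: the statement is the Claim_ definition above) =====
theorem rendered_string_spec : Claim_equal_rendered_string := by
  intro s _
  unfold Spec_rendered_string rendered_string rendered_string_alt
  rw [pvGoB_eq]
  simp [pvDropN]
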